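-- pv_equiv track=rewrite | github.com/ficmichal/NLP_Exercises | Clusterization/calc_stats.py | calculate_coeffs
-- ===== SOURCE A (Python) =====
-- def calculate_coeffs(data_clusters, learn_clusters):
--     coeffs = []
--     for lc in learn_clusters:
--         for dc in range(0, len(data_clusters)):
--             cluster_coeffs = [0, 0, 0]  # TP, FP, FN
--             if lc[0] in data_clusters[dc]:  # match clusters
--                 for i in data_clusters[dc]:
--                     if i in lc:
--                         cluster_coeffs[0] += 1  # TP
--                     else:
--                         cluster_coeffs[2] += 1  # FN
--                 for j in lc:
--                     if j not in data_clusters[dc]: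
--                         cluster_coeffs[1] += 1  # FP
--                 coeffs.append(cluster_coeffs)
--                 break
--     return coeffs
-- ===== SOURCE B (Python) =====
-- def calculate_coeffs(data_clusters, learn_clusters):
--     # Element -> index of the first data cluster containing it, built by filling
--     # the map from the LAST cluster down to the first: later (smaller-index)
--     # writes overwrite earlier ones, so without any scans or conditionals the
--     # surviving value is the first-occurrence index.
--     first = {}
--     for idx in range(len(data_clusters) - 1, -1, -1):
--         for x in data_clusters[idx]:
--             first[x] = idx
--     coeffs = []
--     for lc in learn_clusters:
--         idx = first.get(lc[0], -1)
--         if idx < 0: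
--             continue
--         dcl = data_clusters[idx]
--         # frequency tables; TP/FP/FN fall out as totals over distinct keys:
--         # TP = sum of dcl-multiplicities of shared keys, FP/FN by subtraction
--         cd = {}
--         for x in dcl:
--             cd[x] = cd.get(x, 0) + 1
--         cl = {}
--         for y in lc:
--             cl[y] = cl.get(y, 0) + 1
--         tp = sum(c for x, c in cd.items() if x in cl)
--         matched = sum(c for y, c in cl.items() if y in cd)
--         coeffs.append([tp, len(lc) - matched, len(dcl) - tp])
--     return coeffs
-- ===== Notes on version B (the rewrite author's own statement) =====
-- stated objective: faster
-- what changed: B replaces A's per-learn-cluster scan over all data clusters and its per-element list-membership counting loops by an element-to-first-cluster-index map filled back-to-front with plain overwrites, plus two frequency tables from which TP/FP/FN are obtained arithmetically as sums of multiplicities over distinct shared keys.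
-- outside the precondition, e.g. on calculate_coeffs([], [[]]): A returns [], B raises IndexError
import Mathlib
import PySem

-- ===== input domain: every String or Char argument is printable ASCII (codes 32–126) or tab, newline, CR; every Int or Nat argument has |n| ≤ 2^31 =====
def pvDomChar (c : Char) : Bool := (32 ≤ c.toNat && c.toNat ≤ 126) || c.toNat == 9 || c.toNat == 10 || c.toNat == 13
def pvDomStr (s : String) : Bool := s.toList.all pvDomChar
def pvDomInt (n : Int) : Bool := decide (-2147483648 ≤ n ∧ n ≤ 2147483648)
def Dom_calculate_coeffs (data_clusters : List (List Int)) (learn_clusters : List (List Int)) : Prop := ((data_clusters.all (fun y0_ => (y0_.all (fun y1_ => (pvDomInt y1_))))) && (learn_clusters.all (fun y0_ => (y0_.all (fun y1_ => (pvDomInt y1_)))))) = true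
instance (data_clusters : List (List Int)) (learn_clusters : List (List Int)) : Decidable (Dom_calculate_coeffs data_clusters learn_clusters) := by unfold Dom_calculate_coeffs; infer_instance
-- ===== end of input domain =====

-- B finds the matched data cluster through an element→first-cluster-index map filled
-- back-to-front with plain overwrites, and derives TP/FP/FN arithmetically from two
-- frequency tables (sums over distinct shared keys); objective: faster.

-- ===== PORT A =====
-- the [0,0,0] mutable triple, the two counting loops over data_clusters[dc] and lc
def aCounts (dcl lc : List Int) : List Int :=
  let c1 : Int × Int × Int := dcl.foldl (fun c i =>
    if lc.contains i then (c.1 + 1, c.2.1, c.2.2) else (c.1, c.2.1, c.2.2 + 1)) (0, 0, 0)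
  let c2 : Int × Int × Int := lc.foldl (fun c j =>
    if !dcl.contains j then (c.1, c.2.1 + 1, c.2.2) else c) c1
  [c2.1, c2.2.1, c2.2.2]

-- the 'for dc in range(...)' scan with break; lc[0] is total here (lc.headD 0):
-- Pre_ excludes empty learn clusters, on which Python raises IndexError
def aInner (lc : List Int) : List (List Int) → Option (List Int)
  | [] => none
  | dcl :: rest => if dcl.contains (lc.headD 0) then some (aCounts dcl lc) else aInner lc rest

def calculate_coeffs (data_clusters : List (List Int)) (learn_clusters : List (List Int)) : List (List Int) :=
  learn_clusters.foldl (fun coeffs lc =>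
    match aInner lc data_clusters with
    | some cc => coeffs ++ [cc]
    | none => coeffs) []

-- ===== PORT B =====
-- 'for idx in range(len(data_clusters)-1, -1, -1): for x in data_clusters[idx]: first[x] = idx'
def bBuild (data_clusters : List (List Int)) : PySem.Dict Int Int :=
  (PySem.List.pyRange ((data_clusters.length : Int) - 1) (-1) (-1)).foldl
    (fun d idx => (PySem.List.pyGetD data_clusters idx []).foldl (fun d x => d.insert x idx) d)
    PySem.Dict.empty

-- one iteration of B's main loop; lc[0] total as lc.headD 0 (Pre_ excludes empty lc)
def bRow (data_clusters : List (List Int)) (first : PySem.Dict Int Int) (lc : List Int) : Option (List Int) :=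
  let idx := first.getD (lc.headD 0) (-1)
  if idx < 0 then none
  else
    let dcl := PySem.List.pyGetD data_clusters idx []
    let cd := dcl.foldl (fun d x => d.insert x (d.getD x 0 + 1)) PySem.Dict.empty
    let cl := lc.foldl (fun d y => d.insert y (d.getD y 0 + 1)) PySem.Dict.empty
    let tp := cd.items.foldl (fun s p => if cl.contains p.1 then s + p.2 else s) (0 : Int)
    let matched := cl.items.foldl (fun s p => if cd.contains p.1 then s + p.2 else s) (0 : Int)
    some [tp, (lc.length : Int) - matched, (dcl.length : Int) - tp]

def calculate_coeffs_alt (data_clusters : List (List Int)) (learn_clusters : List (List Int)) : List (List Int) :=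
  let first := bBuild data_clusters
  learn_clusters.foldl (fun coeffs lc =>
    match bRow data_clusters first lc with
    | some cc => coeffs ++ [cc]
    | none => coeffs) []

-- ===== PRECONDITION & SPEC =====
-- Pre_ excludes empty learn clusters: on them A raises IndexError at lc[0] whenever
-- data_clusters is nonempty, and B (which always evaluates lc[0]) raises on them even
-- when data_clusters is empty, where A returns [] since its inner loop body never runs.
def Pre_calculate_coeffs (data_clusters : List (List Int)) (learn_clusters : List (List Int)) : Prop :=
  ∀ lc ∈ learn_clusters, lc ≠ []
instance (data_clusters : List (List Int)) (learn_clusters : List (List Int)) : Decidable (Pre_calculate_coeffs data_clusters learn_clusters) := by unfold Pre_calculate_coeffs; infer_instance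

def pvWitness_calculate_coeffs : List (List Int) × List (List Int) := ([[1, 2], [3]], [[1, 2], [3, 4], [5]])

def Spec_calculate_coeffs (data_clusters : List (List Int)) (learn_clusters : List (List Int)) (out : List (List Int)) : Prop := out = calculate_coeffs_alt data_clusters learn_clusters
instance (data_clusters : List (List Int)) (learn_clusters : List (List Int)) (out : List (List Int)) : Decidable (Spec_calculate_coeffs data_clusters learn_clusters out) := by unfold Spec_calculate_coeffs; infer_instance

-- ===== CLAIM (what is proved, stated in full; the proofs are below) =====
def Claim_equal_calculate_coeffs : Prop := ∀ (data_clusters : List (List Int)) (learn_clusters : List (List Int)), Dom_calculate_coeffs data_clusters learn_clusters → Pre_calculate_coeffs data_clusters learn_clusters → Spec_calculate_coeffs data_clusters learn_clusters (calculate_coeffs data_clusters learn_clusters)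

-- ===== LEMMAS AND PROOFS =====

-- first index (from idx on) of a cluster containing h: what A's break-scan computes
def aFind (h : Int) : Int → List (List Int) → Option Int
  | _, [] => none
  | idx, dcl :: rest => if dcl.contains h then some idx else aFind h (idx + 1) rest

theorem aFind_nonneg (h : Int) (idx : Int) (hidx : 0 ≤ idx) (data : List (List Int)) (j : Int)
    (hj : aFind h idx data = some j) : 0 ≤ j := by
  induction data generalizing idx with
  | nil => simp [aFind] at hj
  | cons dcl rest ih =>
    simp only [aFind] at hj
    split at hj
    · cases hj; omega
    · exact ih (idx + 1) (by omega) hj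

theorem aFind_shift (h : Int) (data : List (List Int)) (idx : Int) :
    aFind h (idx + 1) data = (aFind h idx data).map (· + 1) := by
  induction data generalizing idx with
  | nil => simp [aFind]
  | cons dcl rest ih =>
    simp only [aFind]
    by_cases hc : dcl.contains h = true
    · rw [if_pos hc, if_pos hc, Option.map_some]
    · rw [if_neg hc, if_neg hc, ih (idx + 1)]

theorem aFind_append (h : Int) (xs ys : List (List Int)) (idx : Int) :
    aFind h idx (xs ++ ys) =
      match aFind h idx xs with
      | some i => some i
      | none => aFind h (idx + xs.length) ys := by
  induction xs generalizing idx with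
  | nil => simp [aFind]
  | cons dcl rest ih =>
    simp only [List.cons_append, aFind]
    by_cases hc : dcl.contains h = true
    · rw [if_pos hc, if_pos hc]
    · rw [if_neg hc, if_neg hc, ih (idx + 1)]
      simp only [List.length_cons]
      have : idx + 1 + (rest.length : Int) = idx + ((rest.length : Int) + 1) := by ring
      rw [this]
      push_cast
      ring_nf

theorem pyGetD_cons_succ (x : List Int) (xs : List (List Int)) (j : Int) (hj : 0 ≤ j) :
    PySem.List.pyGetD (x :: xs) (j + 1) ([] : List Int) = PySem.List.pyGetD xs j [] := by
  obtain ⟨m, rfl⟩ := Int.eq_ofNat_of_zero_le hj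
  have h1 : ((m : Int) + 1) = ((m + 1 : Nat) : Int) := by push_cast; ring
  rw [h1, PySem.List.pyGetD_natCast, PySem.List.pyGetD_natCast]
  simp

theorem aInner_eq_map (lc : List Int) (data : List (List Int)) :
    aInner lc data = (aFind (lc.headD 0) 0 data).map
      (fun j => aCounts (PySem.List.pyGetD data j []) lc) := by
  induction data with
  | nil => simp [aInner, aFind]
  | cons dcl rest ih =>
    by_cases hc : lc.headD 0 ∈ dcl
    · have hc' : dcl.contains (lc.headD 0) = true := by simpa using hc
      simp only [aInner, aFind]
      rw [if_pos hc', if_pos hc', Option.map_some, PySem.List.pyGetD_zero_cons]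
    · have hc' : ¬ dcl.contains (lc.headD 0) = true := by simpa using hc
      simp only [aInner, aFind]
      rw [if_neg hc', if_neg hc', ih, aFind_shift]
      cases hf : aFind (lc.headD 0) 0 rest with
      | none => simp
      | some j =>
        have hj : 0 ≤ j := aFind_nonneg _ 0 le_rfl rest j hf
        simp [pyGetD_cons_succ _ _ j hj]

-- all-same-value insert loop: last write wins, every write is idx
theorem insertAll_get (dcl : List Int) (d : PySem.Dict Int Int) (idx h : Int) :
    ((dcl.foldl (fun d x => d.insert x idx) d).get? h) =
      if dcl.contains h then some idx else d.get? h := by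
  induction dcl generalizing d with
  | nil => simp
  | cons x rest ih =>
    simp only [List.foldl_cons, ih, List.contains_cons]
    by_cases hm : h ∈ rest
    · simp [hm]
    · by_cases hx : h = x
      · subst hx
        simp [hm, PySem.Dict.get?_insert_self]
      · simp [hm, hx, PySem.Dict.get?_insert_of_ne _ _ hx]

theorem bBuild_aux (data : List (List Int)) (k : Nat) (hk : k ≤ data.length)
    (d : PySem.Dict Int Int) (h : Int) :
    (((PySem.List.pyRange ((k : Int) - 1) (-1) (-1)).foldl
      (fun d idx => (PySem.List.pyGetD data idx []).foldl (fun d x => d.insert x idx) d) d).get? h)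
    = match aFind h 0 (data.take k) with
      | some i => some i
      | none => d.get? h := by
  induction k generalizing d with
  | zero =>
    rw [PySem.List.pyRange_neg_one_eq_nil (by norm_num)]
    simp [aFind]
  | succ k ih =>
    have hk' : k ≤ data.length := by omega
    have hkl : k < data.length := by omega
    have hcast : ((k + 1 : Nat) : Int) - 1 = (k : Int) := by push_cast; ring
    rw [hcast, PySem.List.pyRange_neg_one_cons (show (-1 : Int) < (k : Int) by omega)]
    simp only [List.foldl_cons]
    rw [ih hk']
    have hget : PySem.List.pyGetD data (k : Int) ([] : List Int) = data[k] := by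
      rw [PySem.List.pyGetD_natCast]
      simp [List.getD, hkl]
    have htake : data.take (k + 1) = data.take k ++ [data[k]] := by
      rw [List.take_add_one]
      simp [List.getElem?_eq_getElem hkl]
    rw [htake, aFind_append]
    have hlen : ((data.take k).length : Int) = (k : Int) := by
      simp [List.length_take, Nat.min_eq_left hk']
    rw [hlen, hget]
    cases hf : aFind h 0 (data.take k) with
    | some i => rfl
    | none =>
      rw [insertAll_get]
      by_cases hc : h ∈ data[k]
      · simp [aFind, hc]
      · simp [aFind, hc]

theorem bBuild_get (data : List (List Int)) (h : Int) :
    (bBuild data).get? h = aFind h 0 data := by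
  unfold bBuild
  rw [bBuild_aux data data.length le_rfl PySem.Dict.empty h]
  rw [List.take_length]
  cases hf : aFind h 0 data with
  | some i => rfl
  | none => simp [PySem.Dict.get?_empty]

-- A's first counting loop unrolled: TP and FN as countP / length arithmetic
theorem fold1_eq (lc : List Int) (dcl : List Int) (a b c : Int) :
    dcl.foldl (fun c i =>
        if lc.contains i then (c.1 + 1, c.2.1, c.2.2) else (c.1, c.2.1, c.2.2 + 1)) (a, b, c)
      = (a + (dcl.countP (fun i => lc.contains i) : Int), b,
         c + ((dcl.length : Int) - (dcl.countP (fun i => lc.contains i) : Int))) := by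
  induction dcl generalizing a c with
  | nil => simp
  | cons i rest ih =>
    simp only [List.foldl_cons, List.countP_cons, List.length_cons]
    by_cases hb : lc.contains i = true
    · rw [if_pos hb, if_pos hb, ih]
      simp only [Prod.mk.injEq]
      refine ⟨?_, ?_, ?_⟩ <;> first | trivial | (push_cast; ring)
    · rw [if_neg hb, if_neg hb, ih]
      simp only [Prod.mk.injEq]
      refine ⟨?_, ?_, ?_⟩ <;> first | trivial | (push_cast; ring)

-- A's second counting loop: FP as a countP
theorem fold2_eq (dcl : List Int) (lc : List Int) (a b c : Int) :
    lc.foldl (fun c j => if !dcl.contains j then (c.1, c.2.1 + 1, c.2.2) else c) (a, b, c)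
      = (a, b + (lc.countP (fun j => !dcl.contains j) : Int), c) := by
  induction lc generalizing b with
  | nil => simp
  | cons j rest ih =>
    simp only [List.foldl_cons, List.countP_cons]
    by_cases hb : (!dcl.contains j) = true
    · rw [if_pos hb, if_pos hb, ih]
      simp only [Prod.mk.injEq]
      refine ⟨?_, ?_, ?_⟩ <;> first | trivial | (push_cast; ring)
    · rw [if_neg hb, if_neg hb, ih]
      simp only [Prod.mk.injEq]
      refine ⟨?_, ?_, ?_⟩ <;> trivial

-- guarded accumulating fold as a sum of an ite-map
theorem foldl_ite_add {α : Type} (L : List α) (p : α → Bool) (f : α → Int) (s : Int) :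
    L.foldl (fun s x => if p x then s + f x else s) s
      = s + (L.map (fun x => if p x then f x else 0)).sum := by
  induction L generalizing s with
  | nil => simp
  | cons x rest ih =>
    simp only [List.foldl_cons, List.map_cons, List.sum_cons]
    by_cases hp : p x = true
    · rw [if_pos hp, if_pos hp, ih]; ring
    · rw [if_neg hp, if_neg hp, ih]; ring

theorem sum_map_ite_eq_filter {α : Type} (L : List α) (p : α → Bool) (f : α → Int) :
    (L.map (fun x => if p x then f x else 0)).sum = ((L.filter p).map f).sum := by
  induction L with
  | nil => simp
  | cons x rest ih =>
    by_cases hp : p x = true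
    · simp [hp, ih]
    · simp [hp, ih]

-- the distinct elements in first-occurrence order are a permutation of dedup
theorem set_ofList_perm_dedup (xs : List Int) :
    (PySem.Set.ofList xs : List Int).Perm xs.dedup := by
  rw [List.perm_ext_iff_of_nodup (PySem.Set.nodup_ofList xs) (List.nodup_dedup xs)]
  intro a
  rw [PySem.Set.mem_ofList, List.mem_dedup]

-- sum of source-list multiplicities over the distinct keys passing p = countP p
theorem sum_over_set_eq_countP (xs : List Int) (p : Int → Bool) :
    ((PySem.Set.ofList xs : List Int).map (fun k => if p k then (xs.count k : Int) else 0)).sum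
      = (xs.countP p : Int) := by
  rw [sum_map_ite_eq_filter]
  have hperm : ((PySem.Set.ofList xs : List Int).filter p).Perm (xs.dedup.filter p) :=
    (set_ofList_perm_dedup xs).filter p
  rw [(hperm.map (fun k => (xs.count k : Int))).sum_eq]
  have := List.sum_map_count_dedup_filter_eq_countP p xs
  have hcast : ((xs.dedup.filter p).map (fun k => (xs.count k : Int))).sum
      = (((xs.dedup.filter p).map xs.count).sum : Int) := by
    rw [Nat.cast_list_sum, List.map_map]
    rfl
  rw [hcast, this]

theorem contains_counter_eq (xs : List Int) (v : Int) :
    (PySem.Dict.counter xs).contains v = xs.contains v := by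
  simp [PySem.Dict.contains_counter]

-- B's item-sum over a counter's items = countP of the source list
theorem items_fold_eq_countP (xs ys : List Int) :
    ((PySem.Dict.counter xs).items.foldl
      (fun s q => if (PySem.Dict.counter ys).contains q.1 then s + q.2 else s) (0 : Int))
      = (xs.countP (fun x => ys.contains x) : Int) := by
  simp only [contains_counter_eq]
  rw [PySem.Dict.items_counter, List.foldl_map, foldl_ite_add, zero_add]
  exact sum_over_set_eq_countP xs (fun x => ys.contains x)

-- both rows are equal: A's break-scan row = B's dict-and-frequency-table row
theorem row_eq (data : List (List Int)) (lc : List Int) :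
    aInner lc data = bRow data (bBuild data) lc := by
  unfold bRow
  rw [PySem.Dict.getD_eq_get?_getD, bBuild_get, aInner_eq_map]
  cases hf : aFind (lc.headD 0) 0 data with
  | none => simp
  | some i =>
    have hi : 0 ≤ i := aFind_nonneg _ 0 le_rfl data i hf
    simp only [Option.getD_some, Option.map_some]
    rw [if_neg (by omega)]
    have hcd : (PySem.List.pyGetD data i ([] : List Int)).foldl
        (fun d x => d.insert x (d.getD x 0 + 1)) PySem.Dict.empty
        = PySem.Dict.counter (PySem.List.pyGetD data i []) :=
      PySem.Dict.foldl_insert_getD_add_one_eq_counter _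
    have hcl : lc.foldl (fun d y => d.insert y (d.getD y 0 + 1)) PySem.Dict.empty
        = PySem.Dict.counter lc :=
      PySem.Dict.foldl_insert_getD_add_one_eq_counter _
    simp only [hcd, hcl]
    rw [items_fold_eq_countP (PySem.List.pyGetD data i []) lc,
        items_fold_eq_countP lc (PySem.List.pyGetD data i [])]
    unfold aCounts
    simp only [fold1_eq, fold2_eq, zero_add]
    have hfp : (lc.countP (fun j => !(PySem.List.pyGetD data i ([] : List Int)).contains j) : Int)
        = (lc.length : Int)
          - (lc.countP (fun y => (PySem.List.pyGetD data i ([] : List Int)).contains y) : Int) := by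
      have h1 := List.length_eq_countP_add_countP
        (p := fun y => (PySem.List.pyGetD data i ([] : List Int)).contains y) (l := lc)
      have h2 : lc.countP
            (fun a => decide ¬(PySem.List.pyGetD data i ([] : List Int)).contains a = true)
          = lc.countP (fun j => !(PySem.List.pyGetD data i ([] : List Int)).contains j) := by
        apply List.countP_congr
        intro a _
        simp
      omega
    rw [hfp]

-- ===== VERDICT (by name: the statement is the Claim_ definition above) =====
theorem calculate_coeffs_spec : Claim_equal_calculate_coeffs := by
  intro data learn _ _
  unfold Spec_calculate_coeffs calculate_coeffs calculate_coeffs_alt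
  simp only [row_eq data]
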